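-- pv_equiv track=rewrite | github.com/bryanvillar69/firstproject | SLOT MACHINE.py | horizontal_score_line_one
-- ===== SOURCE A (Python) =====
-- def pattern_count_horizontal(run_length):
--     if run_length == 2:
--         return 2
--     elif run_length == 3:
--         return 3
--     elif run_length == 4:
--         return 5
--     elif run_length == 5:
--         return 10
--     else:
--         return 0
--
-- def horizontal_score_line_one(slot_line_one, h_score):  # horizontal score for line 1
--     run_length = 1
--     patterns_h1 = []
--     h_score_line_one = ""
--     for i in range(len(slot_line_one) - 1):
--         if slot_line_one[i] == slot_line_one[i + 1]:
--             run_length += 1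
--         else:
--             if run_length >= 2:
--                 patterns_h1.append(f"{slot_line_one[i]} x{run_length}")
--             h_score += pattern_count_horizontal(run_length)
--             run_length = 1
--
--     # append last run if >=2
--     if run_length >= 2:
--         patterns_h1.append(f"{slot_line_one[-1]} x{run_length}")
--     h_score += pattern_count_horizontal(run_length)
--
--     if patterns_h1:
--         for pattern in patterns_h1:
--             h_score_line_one += f" {pattern}"
--
--     return h_score , h_score_line_one
-- ===== SOURCE B (Python) =====
-- def horizontal_score_line_one(slot_line_one, h_score):
--     n = len(slot_line_one)
--     # cut positions: 0, every index where the symbol changes, and n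
--     cuts = [0] + [i + 1 for i in range(n - 1)
--                   if slot_line_one[i] != slot_line_one[i + 1]] + [n]
--     runs = [(slot_line_one[s], e - s)
--             for s, e in zip(cuts, cuts[1:]) if s < e]
--     SCORE = {2: 2, 3: 3, 4: 5, 5: 10}
--     total = h_score + sum(SCORE.get(r, 0) for _, r in runs)
--     text = ''.join(f' {sym} x{r}' for sym, r in runs if r >= 2)
--     return total, text
-- ===== Notes on version B (the rewrite author's own statement) =====
-- stated objective: alternative
-- what changed: Replaces A's single stateful scan (carried run_length, pattern list, separate final-run branch) by staged passes: compute the list of boundary cut positions, difference adjacent cuts into (symbol, run-length) pairs, score them through a dict lookup table and join the formatted pieces.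
import Mathlib
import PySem

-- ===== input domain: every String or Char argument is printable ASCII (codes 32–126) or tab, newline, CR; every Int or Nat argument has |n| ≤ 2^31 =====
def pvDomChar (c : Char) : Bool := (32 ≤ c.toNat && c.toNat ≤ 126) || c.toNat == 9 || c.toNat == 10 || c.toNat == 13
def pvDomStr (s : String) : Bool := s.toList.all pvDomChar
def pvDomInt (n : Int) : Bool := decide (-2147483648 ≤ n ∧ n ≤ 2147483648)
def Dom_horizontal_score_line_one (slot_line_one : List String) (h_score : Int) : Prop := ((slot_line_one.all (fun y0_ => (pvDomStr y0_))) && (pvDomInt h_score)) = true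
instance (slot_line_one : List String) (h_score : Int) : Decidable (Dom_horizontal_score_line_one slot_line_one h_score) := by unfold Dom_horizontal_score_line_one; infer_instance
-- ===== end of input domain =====

-- B replaces A's single stateful loop by staged passes: it computes the list of boundary
-- cut positions, differences adjacent cuts into (symbol, run-length) pairs, scores them via
-- a lookup table and joins the formatted pieces; alternative decomposition, same cost.


-- ===== PORT A =====
def pattern_count_horizontal (run_length : Int) : Int :=
  if run_length = 2 then 2
  else if run_length = 3 then 3
  else if run_length = 4 then 5
  else if run_length = 5 then 10
  else 0

-- literal port of A: fold over range(len-1); indices are in range, so pyGetD "" is exact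
def horizontal_score_line_one (slot_line_one : List String) (h_score : Int) : Int × String :=
  let st := (PySem.List.pyRange 0 ((slot_line_one.length : Int) - 1) 1).foldl
    (fun (st : Int × List String × Int) i =>
      let run_length := st.1; let patterns_h1 := st.2.1; let h := st.2.2
      if PySem.List.pyGetD slot_line_one i "" = PySem.List.pyGetD slot_line_one (i + 1) "" then
        (run_length + 1, patterns_h1, h)
      else
        (1,
         (if run_length ≥ 2 then
            patterns_h1 ++ [PySem.List.pyGetD slot_line_one i "" ++ " x" ++ PySem.Int.toStr run_length]
          else patterns_h1),
         h + pattern_count_horizontal run_length))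
    (1, [], h_score)
  let run_length := st.1; let patterns_h1 := st.2.1; let h := st.2.2
  let patterns_h1 :=
    if run_length ≥ 2 then
      patterns_h1 ++ [PySem.List.pyGetD slot_line_one (-1) "" ++ " x" ++ PySem.Int.toStr run_length]
    else patterns_h1
  let h := h + pattern_count_horizontal run_length
  let h_score_line_one :=
    if patterns_h1 ≠ [] then patterns_h1.foldl (fun acc pattern => acc ++ " " ++ pattern) "" else ""
  (h, h_score_line_one)

-- ===== PORT B =====
-- Source B line by line: the inner comprehension producing the change positions i+1
def midsB (L : List String) : List Nat :=
  ((List.range (L.length - 1)).filter (fun i => L.getD i "" != L.getD (i + 1) "")).map (· + 1)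

-- cuts = [0] + [...] + [n]
def cutsB (L : List String) : List Nat := 0 :: midsB L ++ [L.length]

-- runs = [(line[s], e - s) for s, e in zip(cuts, cuts[1:]) if s < e]   (indices are in range, getD "" exact)
def runsB (L : List String) : List (String × Nat) :=
  (((cutsB L).zip (cutsB L).tail).filter (fun p => decide (p.1 < p.2))).map
    (fun p => (L.getD p.1 "", p.2 - p.1))

-- SCORE = {2: 2, 3: 3, 4: 5, 5: 10}
def scoreTable : PySem.Dict Int Int := PySem.Dict.ofList [(2, 2), (3, 3), (4, 5), (5, 10)]

def horizontal_score_line_one_alt (slot_line_one : List String) (h_score : Int) : Int × String :=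
  let runs := runsB slot_line_one
  let total := h_score + (runs.map (fun p => scoreTable.getD ((p.2 : Int)) 0)).sum
  let text := String.join ((runs.filter (fun p => decide (2 ≤ p.2))).map
    (fun p => " " ++ p.1 ++ " x" ++ PySem.Int.toStr (p.2 : Int)))
  (total, text)

-- ===== PRECONDITION & SPEC =====
def Spec_horizontal_score_line_one (slot_line_one : List String) (h_score : Int) (out : Int × String) : Prop := out = horizontal_score_line_one_alt slot_line_one h_score
instance (slot_line_one : List String) (h_score : Int) (out : Int × String) : Decidable (Spec_horizontal_score_line_one slot_line_one h_score out) := by unfold Spec_horizontal_score_line_one; infer_instance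

-- ===== CLAIM (what is proved, stated in full; the proofs are below) =====
def Claim_equal_horizontal_score_line_one : Prop := ∀ (slot_line_one : List String) (h_score : Int), Dom_horizontal_score_line_one slot_line_one h_score → Spec_horizontal_score_line_one slot_line_one h_score (horizontal_score_line_one slot_line_one h_score)

-- ===== LEMMAS AND PROOFS =====

-- proof-side helpers: the canonical run decomposition both ports compute
def takeRun (x : String) : List String → Nat × List String
  | [] => (0, [])
  | y :: ys => if y = x then ((takeRun x ys).1 + 1, (takeRun x ys).2) else (0, y :: ys)

theorem takeRun_snd_length (x : String) (ys : List String) : (takeRun x ys).2.length ≤ ys.length := by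
  induction ys with
  | nil => simp [takeRun]
  | cons y ys ih =>
    by_cases h : y = x
    · simp [takeRun, h]; omega
    · simp [takeRun, h]

def runsOf : List String → List (String × Nat)
  | [] => []
  | x :: xs => (x, (takeRun x xs).1 + 1) :: runsOf (takeRun x xs).2
termination_by xs => xs.length
decreasing_by exact Nat.lt_succ_of_le (takeRun_snd_length _ _)

def patStr (s : String) (r : Int) : String := s ++ " x" ++ PySem.Int.toStr r

def goA (cur : String) (r : Int) : List String → Int × List String
  | [] => (pattern_count_horizontal r, if r ≥ 2 then [patStr cur r] else [])
  | y :: ys =>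
    if cur = y then goA y (r + 1) ys
    else
      (pattern_count_horizontal r + (goA y 1 ys).1,
       (if r ≥ 2 then [patStr cur r] else []) ++ (goA y 1 ys).2)

def scoreRuns : List (String × Nat) → Int
  | [] => 0
  | p :: rs => pattern_count_horizontal (p.2 : Int) + scoreRuns rs

def patsOf : List (String × Nat) → List String
  | [] => []
  | p :: rs => (if ((p.2 : Int)) ≥ 2 then [patStr p.1 (p.2 : Int)] else []) ++ patsOf rs

def renderPats : List String → String
  | [] => ""
  | p :: ps => " " ++ p ++ renderPats ps

theorem renderPats_append (a b : List String) :
    renderPats (a ++ b) = renderPats a ++ renderPats b := by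
  induction a with
  | nil => simp [renderPats]
  | cons p ps ih => simp [renderPats, ih, String.append_assoc]

theorem render_foldl (ps : List String) (s : String) :
    ps.foldl (fun acc pattern => acc ++ " " ++ pattern) s = s ++ renderPats ps := by
  induction ps generalizing s with
  | nil => simp [renderPats]
  | cons p ps ih =>
    simp only [List.foldl_cons, renderPats, ih]
    simp [String.append_assoc]

-- ---------- A side (index fold → run decomposition) ----------

theorem fold_range_zip {σ : Type} (L : List String) (F : σ → String → String → σ) (init : σ) :
    (PySem.List.pyRange 0 ((L.length : Int) - 1) 1).foldl
      (fun st i => F st (PySem.List.pyGetD L i "") (PySem.List.pyGetD L (i + 1) "")) init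
    = (L.zip L.tail).foldl (fun st p => F st p.1 p.2) init := by
  have hmap : (List.range (L.length - 1)).map (fun k => ((L.getD k ""), (L.getD (k+1) ""))) = L.zip L.tail := by
    apply List.ext_getElem
    · simp
    · intro i h1 h2
      simp only [List.getElem_map, List.getElem_range, List.getElem_zip, List.getElem_tail]
      have hi : i < L.length := by simp at h1; omega
      have hi1 : i + 1 < L.length := by simp at h1; omega
      rw [List.getD_eq_getElem _ _ hi, List.getD_eq_getElem _ _ hi1]
  rw [PySem.List.pyRange_one, List.foldl_map, ← hmap, List.foldl_map]
  have hn : ((L.length:Int) - 1 - 0).toNat = L.length - 1 := by omega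
  rw [hn]
  congr 1
  funext st k
  simp only [zero_add]
  rw [show ((k:Int)+1) = ((k+1:Nat):Int) from by push_cast; ring]
  simp only [PySem.List.pyGetD_natCast]

def Astep (st : Int × List String × Int) (p : String × String) : Int × List String × Int :=
  if p.1 = p.2 then (st.1 + 1, st.2.1, st.2.2)
  else (1, (if st.1 ≥ 2 then st.2.1 ++ [patStr p.1 st.1] else st.2.1),
        st.2.2 + pattern_count_horizontal st.1)

theorem A_main (xs : List String) (x : String) (r : Int) (ps : List String) (h : Int) :
    (let st := ((x :: xs).zip xs).foldl Astep (r, ps, h)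
     (st.2.2 + pattern_count_horizontal st.1,
      if st.1 ≥ 2 then st.2.1 ++ [patStr ((x :: xs).getLast (by simp)) st.1] else st.2.1))
    = (h + (goA x r xs).1, ps ++ (goA x r xs).2) := by
  induction xs generalizing x r ps h with
  | nil =>
    simp only [List.zip_nil_right, List.foldl_nil, goA, List.getLast_singleton]
    split_ifs <;> simp
  | cons y ys ih =>
    simp only [List.zip_cons_cons, List.foldl_cons]
    by_cases hxy : x = y
    · have hstep : Astep (r, ps, h) (x, y) = (r + 1, ps, h) := by simp [Astep, hxy]
      rw [hstep]
      have := ih y (r + 1) ps h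
      simp only [List.getLast_cons_cons] at this ⊢
      rw [this]
      simp [goA, hxy]
    · have hstep : Astep (r, ps, h) (x, y)
          = (1, (if r ≥ 2 then ps ++ [patStr x r] else ps), h + pattern_count_horizontal r) := by
        simp [Astep, hxy]
      rw [hstep]
      have := ih y 1 (if r ≥ 2 then ps ++ [patStr x r] else ps) (h + pattern_count_horizontal r)
      simp only [List.getLast_cons_cons] at this ⊢
      rw [this]
      simp only [goA, if_neg hxy]
      refine Prod.ext ?_ ?_
      · simp; ring
      · split_ifs <;> simp

theorem goA_runs (xs : List String) (x : String) (r : Int) :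
    goA x r xs
    = (pattern_count_horizontal (r + ((takeRun x xs).1 : Int)) + scoreRuns (runsOf (takeRun x xs).2),
       (if r + ((takeRun x xs).1 : Int) ≥ 2 then [patStr x (r + ((takeRun x xs).1 : Int))] else [])
         ++ patsOf (runsOf (takeRun x xs).2)) := by
  induction xs generalizing x r with
  | nil => simp [goA, takeRun, runsOf, scoreRuns, patsOf]
  | cons y ys ih =>
    by_cases hxy : x = y
    · subst hxy
      have h1 : takeRun x (x :: ys) = ((takeRun x ys).1 + 1, (takeRun x ys).2) := by
        simp [takeRun]
      have h2 : goA x r (x :: ys) = goA x (r + 1) ys := by simp [goA]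
      rw [h1, h2, ih x (r + 1)]
      have : r + 1 + ((takeRun x ys).1 : Int) = r + (((takeRun x ys).1 + 1 : Nat) : Int) := by
        push_cast; ring
      rw [this]
    · have hyx : ¬ (y = x) := fun hh => hxy hh.symm
      have h1 : takeRun x (y :: ys) = (0, y :: ys) := by simp [takeRun, hyx]
      rw [h1]
      have h2 : goA x r (y :: ys)
          = (pattern_count_horizontal r + (goA y 1 ys).1,
             (if r ≥ 2 then [patStr x r] else []) ++ (goA y 1 ys).2) := by
        simp [goA, hxy]
      have h3 : runsOf (y :: ys) = (y, (takeRun y ys).1 + 1) :: runsOf (takeRun y ys).2 := by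
        simp [runsOf]
      rw [h2, ih y 1, h3]
      simp only [scoreRuns, patsOf, Nat.cast_zero, add_zero]
      have hc : (1 : Int) + ((takeRun y ys).1 : Int) = (((takeRun y ys).1 + 1 : Nat) : Int) := by
        push_cast; ring
      rw [hc]

theorem fold_range_zip' {σ : Type} (L : List String) (G : σ → String × String → σ) (init : σ) :
    (PySem.List.pyRange 0 ((L.length : Int) - 1) 1).foldl
      (fun st i => G st (PySem.List.pyGetD L i "", PySem.List.pyGetD L (i + 1) "")) init
    = (L.zip L.tail).foldl G init :=
  fold_range_zip L (fun st a b => G st (a, b)) init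

theorem A_closed (x : String) (xs : List String) (h : Int) :
    horizontal_score_line_one (x :: xs) h
    = (h + (goA x 1 xs).1, renderPats (goA x 1 xs).2) := by
  unfold horizontal_score_line_one
  have hfun : (fun (st : Int × List String × Int) (i : Int) =>
      let run_length := st.1; let patterns_h1 := st.2.1; let h := st.2.2
      if PySem.List.pyGetD (x :: xs) i "" = PySem.List.pyGetD (x :: xs) (i + 1) "" then
        (run_length + 1, patterns_h1, h)
      else
        (1,
         (if run_length ≥ 2 then
            patterns_h1 ++ [PySem.List.pyGetD (x :: xs) i "" ++ " x" ++ PySem.Int.toStr run_length]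
          else patterns_h1),
         h + pattern_count_horizontal run_length))
      = fun st i => Astep st (PySem.List.pyGetD (x :: xs) i "", PySem.List.pyGetD (x :: xs) (i + 1) "") := by
    funext st i
    simp [Astep, patStr]
  rw [hfun, fold_range_zip']
  have hzip : (x :: xs).zip (x :: xs).tail = (x :: xs).zip xs := rfl
  rw [hzip]
  have hmain := A_main xs x 1 [] h
  simp only at hmain
  have hlast : PySem.List.pyGetD (x :: xs) (-1) "" = (x :: xs).getLast (by simp) :=
    PySem.List.pyGetD_neg_one (x :: xs) "" (by simp)
  rw [hlast]
  dsimp only []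
  set st := ((x :: xs).zip xs).foldl Astep (1, ([] : List String), h) with hst
  have h1 : st.2.2 + pattern_count_horizontal st.1 = h + (goA x 1 xs).1 := by
    have := congrArg Prod.fst hmain; simpa using this
  have h2 : (if st.1 ≥ 2 then st.2.1 ++ [patStr ((x :: xs).getLast (by simp)) st.1] else st.2.1)
      = (goA x 1 xs).2 := by
    have := congrArg Prod.snd hmain; simpa using this
  simp only [patStr] at h2
  rw [h1, h2]
  by_cases hp : (goA x 1 xs).2 = []
  · simp [hp, renderPats]
  · simp only [if_pos (by simpa using hp : (goA x 1 xs).2 ≠ [])]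
    rw [render_foldl, String.empty_append]

-- ---------- B side (cut positions → run decomposition) ----------

theorem takeRun_fst_le (x : String) (xs : List String) : (takeRun x xs).1 ≤ xs.length := by
  induction xs with
  | nil => simp [takeRun]
  | cons y ys ih =>
    by_cases h : y = x
    · simp [takeRun, h]; omega
    · simp [takeRun, h]

theorem takeRun_drop (x : String) (xs : List String) : (takeRun x xs).2 = xs.drop (takeRun x xs).1 := by
  induction xs with
  | nil => simp [takeRun]
  | cons y ys ih =>
    by_cases h : y = x
    · simp [takeRun, h, ih]
    · simp [takeRun, h]

theorem takeRun_getD (x : String) (xs : List String) (i : Nat) (hi : i < (takeRun x xs).1) :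
    xs.getD i "" = x := by
  induction xs generalizing i with
  | nil => simp [takeRun] at hi
  | cons y ys ih =>
    by_cases h : y = x
    · simp only [takeRun, if_pos h] at hi
      cases i with
      | zero => simpa using h
      | succ j => exact ih j (by omega)
    · simp [takeRun, h] at hi

theorem takeRun_head (x : String) (xs : List String) (y : String) (t : List String)
    (h : (takeRun x xs).2 = y :: t) : ¬ y = x := by
  induction xs with
  | nil => simp [takeRun] at h
  | cons z zs ih =>
    by_cases hz : z = x
    · simp only [takeRun, if_pos hz] at h
      exact ih h
    · simp only [takeRun, if_neg hz] at h
      cases h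
      exact hz

-- run-structure decomposition of the change positions
theorem midsB_decomp (x : String) (xs : List String) :
    midsB (x :: xs)
    = (if (takeRun x xs).2 = [] then []
       else ((takeRun x xs).1 + 1) :: (midsB (takeRun x xs).2).map (· + ((takeRun x xs).1 + 1))) := by
  set k := (takeRun x xs).1 with hk
  set rest := (takeRun x xs).2 with hrest
  have hdrop : rest = xs.drop k := by rw [hrest, hk]; exact takeRun_drop x xs
  have hkle : k ≤ xs.length := takeRun_fst_le x xs
  have hgetrun : ∀ i : Nat, i ≤ k → (x :: xs).getD i "" = x := by
    intro i hi
    cases i with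
    | zero => rfl
    | succ j =>
      have : xs.getD j "" = x := takeRun_getD x xs j (by omega)
      simpa using this
  have hgetshift : ∀ j : Nat, (x :: xs).getD (k + 1 + j) "" = rest.getD j "" := by
    intro j
    rw [hdrop]
    rw [List.getD_eq_getElem?_getD, List.getD_eq_getElem?_getD, List.getElem?_drop]
    congr 1
    show (x :: xs)[k + 1 + j]? = xs[k + j]?
    rw [show k + 1 + j = (k + j) + 1 from by omega]
    simp
  have hlen : (x :: xs).length = (k + 1) + rest.length := by
    rw [hdrop]; simp; omega
  by_cases hre : rest = []
  · -- no change anywhere: xs is one run of x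
    have hlen0 : (x :: xs).length - 1 = k := by rw [hlen, hre]; simp
    simp only [midsB, hlen0]
    rw [if_pos hre]
    have hnil : (List.range k).filter
        (fun i => (x :: xs).getD i "" != (x :: xs).getD (i + 1) "") = [] := by
      rw [List.filter_eq_nil_iff]
      intro i hi
      have hik : i < k := by simpa using hi
      have h1 : (x :: xs).getD i "" = x := hgetrun i (by omega)
      have h2 : (x :: xs).getD (i + 1) "" = x := hgetrun (i + 1) (by omega)
      rw [h1, h2]
      simp
    rw [hnil, List.map_nil]
  · rw [if_neg hre]
    obtain ⟨y, t, hyt⟩ : ∃ y t, rest = y :: t := by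
      cases hre' : rest with
      | nil => exact absurd hre' hre
      | cons y t => exact ⟨y, t, rfl⟩
    have hyx : ¬ y = x := takeRun_head x xs y t (by rw [← hrest]; exact hyt)
    have hlen1 : (x :: xs).length - 1 = (k + 1) + (rest.length - 1) := by
      rw [hlen, hyt]; simp
    simp only [midsB, hlen1]
    rw [List.range_add, List.filter_append, List.filter_map, List.map_append, List.map_map]
    -- first block: range (k+1); only i = k passes
    have hfirst : (List.range (k + 1)).filter
        (fun i => (x :: xs).getD i "" != (x :: xs).getD (i + 1) "") = [k] := by
      rw [show k + 1 = k + 1 from rfl, List.range_succ, List.filter_append]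
      have hempty : (List.range k).filter
          (fun i => (x :: xs).getD i "" != (x :: xs).getD (i + 1) "") = [] := by
        rw [List.filter_eq_nil_iff]
        intro i hi
        have hik : i < k := by simpa using hi
        have h1 : (x :: xs).getD i "" = x := hgetrun i (by omega)
        have h2 : (x :: xs).getD (i + 1) "" = x := hgetrun (i + 1) (by omega)
        rw [h1, h2]
        simp
      have hkpass : (x :: xs).getD k "" != (x :: xs).getD (k + 1) "" := by
        have h1 : (x :: xs).getD k "" = x := hgetrun k (le_refl k)
        have h2 : (x :: xs).getD (k + 1) "" = y := by
          have := hgetshift 0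
          rw [hyt] at this
          simpa using this
        rw [h1, h2]
        simp only [bne_iff_ne, ne_eq]
        exact fun hh => hyx hh.symm
      rw [hempty, List.nil_append, List.filter_cons, hkpass]
      simp
    rw [hfirst]
    -- second block: shifted copy of midsB rest
    have hsecond : (List.range (rest.length - 1)).filter
        ((fun i => (x :: xs).getD i "" != (x :: xs).getD (i + 1) "") ∘ (fun i => k + 1 + i))
        = (List.range (rest.length - 1)).filter
            (fun i => rest.getD i "" != rest.getD (i + 1) "") := by
      apply List.filter_congr
      intro i _
      simp only [Function.comp]
      rw [hgetshift i, show k + 1 + i + 1 = k + 1 + (i + 1) from by omega, hgetshift (i + 1)]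
    rw [hsecond]
    simp only [List.map_cons, List.map_nil, List.map_map, List.nil_append, List.cons_append]
    congr 1
    apply List.map_congr_left
    intro i _
    simp only [Function.comp]
    omega

theorem zip_tail_map_shift (c : List Nat) (m : Nat) :
    ((c.map (· + m)).zip ((c.map (· + m)).tail))
      = (c.zip c.tail).map (fun p => (p.1 + m, p.2 + m)) := by
  rw [show (c.map (· + m)).tail = c.tail.map (· + m) from (List.map_tail).symm, List.zip_map]
  rfl

theorem shifted_runs (L rest : List String) (m : Nat) (c : List Nat)
    (hget : ∀ j, L.getD (j + m) "" = rest.getD j "") :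
    ((((c.map (· + m)).zip ((c.map (· + m)).tail)).filter (fun p => decide (p.1 < p.2))).map
        (fun p => (L.getD p.1 "", p.2 - p.1)))
      = (((c.zip c.tail).filter (fun p => decide (p.1 < p.2))).map
          (fun p => (rest.getD p.1 "", p.2 - p.1))) := by
  rw [zip_tail_map_shift, List.filter_map, List.map_map]
  have hfc : ((c.zip c.tail).filter
        ((fun p : Nat × Nat => decide (p.1 < p.2)) ∘ (fun p => (p.1 + m, p.2 + m))))
      = ((c.zip c.tail).filter (fun p => decide (p.1 < p.2))) := by
    apply List.filter_congr
    intro p _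
    simp only [Function.comp]
    exact decide_eq_decide.mpr (by omega)
  rw [hfc]
  apply List.map_congr_left
  intro p _
  simp only [Function.comp]
  rw [hget p.1]
  congr 1
  omega

theorem runsB_cons (x : String) (xs : List String) :
    runsB (x :: xs) = (x, (takeRun x xs).1 + 1) :: runsB (takeRun x xs).2 := by
  set k := (takeRun x xs).1 with hk
  set rest := (takeRun x xs).2 with hrest
  have hdrop : rest = xs.drop k := by rw [hrest, hk]; exact takeRun_drop x xs
  have hkle : k ≤ xs.length := takeRun_fst_le x xs
  have hlen : (x :: xs).length = (k + 1) + rest.length := by rw [hdrop]; simp; omega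
  have hget0 : (x :: xs).getD 0 "" = x := rfl
  have hgetshift : ∀ j : Nat, (x :: xs).getD (j + (k + 1)) "" = rest.getD j "" := by
    intro j
    rw [hdrop]
    rw [List.getD_eq_getElem?_getD, List.getD_eq_getElem?_getD, List.getElem?_drop]
    congr 1
    show (x :: xs)[j + (k + 1)]? = xs[k + j]?
    rw [show j + (k + 1) = (k + j) + 1 from by omega]
    simp
  have hmids := midsB_decomp x xs
  rw [← hk, ← hrest] at hmids
  by_cases hre : rest = []
  · have hlen0 : (x :: xs).length = k + 1 := by rw [hlen, hre]; simp
    rw [if_pos hre] at hmids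
    have hcuts0 : cutsB (x :: xs) = [0, k + 1] := by
      simp only [cutsB, hmids, hlen0]
      rfl
    have hrB : runsB (x :: xs) = [(x, k + 1)] := by
      simp only [runsB, hcuts0, List.tail_cons, List.zip_cons_cons, List.zip_nil_right,
        List.filter_cons]
      rw [if_pos (by simp)]
      simp
    have hrB0 : runsB rest = [] := by
      rw [hre]; simp [runsB, cutsB, midsB]
    rw [hrB, hrB0]
  · rw [if_neg hre] at hmids
    have hcr0 : cutsB rest = 0 :: (midsB rest ++ [rest.length]) := rfl
    have hshape : (cutsB rest).map (· + (k + 1))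
        = (k + 1) :: (midsB rest ++ [rest.length]).map (· + (k + 1)) := by
      rw [hcr0]
      simp only [List.map_cons]
      norm_num
    have hcuts : cutsB (x :: xs) = 0 :: (cutsB rest).map (· + (k + 1)) := by
      rw [hshape]
      simp only [cutsB, hmids, List.cons_append, List.map_append, List.map_cons, List.map_nil,
        hlen]
      simp [Nat.add_comm]
    have hzip2 : (((k + 1) :: (midsB rest ++ [rest.length]).map (· + (k + 1))).zip
          ((midsB rest ++ [rest.length]).map (· + (k + 1))))
        = (((cutsB rest).map (· + (k + 1))).zip (((cutsB rest).map (· + (k + 1))).tail)) := by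
      rw [hshape]
      rfl
    show ((((cutsB (x :: xs)).zip (cutsB (x :: xs)).tail).filter (fun p => decide (p.1 < p.2))).map
        (fun p => ((x :: xs).getD p.1 "", p.2 - p.1))) = (x, k + 1) :: runsB rest
    rw [hcuts, List.tail_cons, hshape, List.zip_cons_cons, List.filter_cons]
    rw [if_pos (by simp)]
    rw [List.map_cons, hzip2, shifted_runs (x :: xs) rest (k + 1) (cutsB rest) hgetshift]
    rw [hget0]
    rfl

theorem runsB_eq_runsOf (L : List String) : runsB L = runsOf L := by
  match L with
  | [] =>
    simp [runsB, cutsB, midsB, runsOf]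
  | x :: xs =>
    rw [runsB_cons, runsB_eq_runsOf (takeRun x xs).2]
    rw [show runsOf (x :: xs) = (x, (takeRun x xs).1 + 1) :: runsOf (takeRun x xs).2 from by
      simp [runsOf]]
termination_by L.length
decreasing_by exact Nat.lt_succ_of_le (takeRun_snd_length _ _)

-- the score table agrees with A's if-chain
theorem scoreTable_getD (z : Int) : scoreTable.getD z 0 = pattern_count_horizontal z := by
  have hmk : scoreTable = PySem.Dict.mk [((2 : Int), (2 : Int)), (3, 3), (4, 5), (5, 10)] := by
    decide
  rw [hmk]
  by_cases h2 : z = 2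
  · subst h2; decide
  · by_cases h3 : z = 3
    · subst h3; decide
    · by_cases h4 : z = 4
      · subst h4; decide
      · by_cases h5 : z = 5
        · subst h5; decide
        · have hfind : List.find? (fun p => p.1 == z)
              [((2 : Int), (2 : Int)), (3, 3), (4, 5), (5, 10)] = none := by
            rw [List.find?_eq_none]
            intro p hp
            simp only [List.mem_cons, List.not_mem_nil, or_false] at hp
            rcases hp with rfl | rfl | rfl | rfl <;> simp only [beq_iff_eq] <;> omega
          simp [PySem.Dict.getD, PySem.Dict.get?, hfind, pattern_count_horizontal, h2, h3, h4, h5]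

theorem sum_scores (rs : List (String × Nat)) :
    (rs.map (fun p => scoreTable.getD ((p.2 : Int)) 0)).sum = scoreRuns rs := by
  induction rs with
  | nil => simp [scoreRuns]
  | cons p rs ih =>
    rw [List.map_cons, List.sum_cons, ih, scoreTable_getD]
    simp [scoreRuns]

theorem strfoldl_shift (l : List String) (s : String) :
    l.foldl (fun r t => r ++ t) s = s ++ l.foldl (fun r t => r ++ t) "" := by
  induction l generalizing s with
  | nil => simp
  | cons a l ih =>
    simp only [List.foldl_cons]
    rw [ih (s ++ a), ih ("" ++ a)]
    simp [String.append_assoc]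

theorem join_cons (s : String) (l : List String) : String.join (s :: l) = s ++ String.join l := by
  show List.foldl (fun r t => r ++ t) "" (s :: l) = s ++ List.foldl (fun r t => r ++ t) "" l
  simp only [List.foldl_cons]
  rw [strfoldl_shift]
  simp

theorem join_pats (rs : List (String × Nat)) :
    String.join ((rs.filter (fun p => decide (2 ≤ p.2))).map
      (fun p => " " ++ p.1 ++ " x" ++ PySem.Int.toStr (p.2 : Int)))
    = renderPats (patsOf rs) := by
  induction rs with
  | nil => rfl
  | cons p rs ih =>
    rw [List.filter_cons]
    by_cases h : 2 ≤ p.2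
    · have hz : ((p.2 : Int)) ≥ 2 := by exact_mod_cast h
      rw [if_pos (by simpa using h), List.map_cons, join_cons, ih]
      simp [patsOf, hz, renderPats, patStr, String.append_assoc]
    · have hz : ¬ ((p.2 : Int)) ≥ 2 := by exact_mod_cast h
      rw [if_neg (by simpa using h), ih]
      simp [patsOf, hz]

theorem B_closed (L : List String) (h : Int) :
    horizontal_score_line_one_alt L h
    = (h + scoreRuns (runsOf L), renderPats (patsOf (runsOf L))) := by
  show (h + ((runsB L).map (fun p => scoreTable.getD ((p.2 : Int)) 0)).sum,
        String.join (((runsB L).filter (fun p => decide (2 ≤ p.2))).map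
          (fun p => " " ++ p.1 ++ " x" ++ PySem.Int.toStr (p.2 : Int))))
      = (h + scoreRuns (runsOf L), renderPats (patsOf (runsOf L)))
  rw [runsB_eq_runsOf, sum_scores, join_pats]

-- ===== VERDICT (by name: the statement is the Claim_ definition above) =====
theorem horizontal_score_line_one_spec : Claim_equal_horizontal_score_line_one := by
  intro L h _
  unfold Spec_horizontal_score_line_one
  rw [B_closed]
  cases L with
  | nil =>
    unfold horizontal_score_line_one
    rw [PySem.List.pyRange_one_eq_nil (by norm_num)]
    norm_num [runsOf, scoreRuns, patsOf, renderPats, pattern_count_horizontal]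
  | cons x xs =>
    rw [A_closed, goA_runs]
    have hruns : runsOf (x :: xs) = (x, (takeRun x xs).1 + 1) :: runsOf (takeRun x xs).2 := by
      simp [runsOf]
    rw [hruns]
    simp only [scoreRuns, patsOf, renderPats_append]
    have hc : (1 : Int) + ((takeRun x xs).1 : Int) = (((takeRun x xs).1 + 1 : Nat) : Int) := by
      push_cast; ring
    refine Prod.ext ?_ ?_
    · simp only [hc]
    · simp only [hc]
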